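-- pv_equiv track=rewrite | github.com/truist/Advent-of-Code-24 | 05/print.py | find_valid_prints
-- ===== SOURCE A (Python) =====
-- def check_print(each, rules):
--     """
--     check a single print to see if it meets all the rules
--     """
--     for rule in rules:
--         try:
--             left = each.index(rule[0])
--             right = each.index(rule[1])
--             if right < left:
--                 return False
--         except ValueError:
--             pass # this rule doesn't apply; just try the next one
--
--     return True
--
-- def find_valid_prints(prints, rules):
--     """
--     check each print to see if it meets all the rules
--     """
--     valid = []
--     invalid = []
--     for each in prints:
--         if check_print(each, rules):
--             valid += [each]
--         else:
--             invalid += [each]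
--
--     return (valid, invalid)
-- ===== SOURCE B (Python) =====
-- def find_valid_prints(prints, rules):
--     """
--     check each print to see if it meets all the rules
--     """
--     after = {}
--     for rule in rules:
--         after.setdefault(rule[0], []).append(rule[1])
--
--     valid = []
--     invalid = []
--     for each in prints:
--         seen = set()
--         ok = True
--         for v in each:
--             if v in seen:
--                 continue
--             if any(w in seen for w in after.get(v, [])):
--                 ok = False
--                 break
--             seen.add(v)
--         if ok:
--             valid.append(each)
--         else:
--             invalid.append(each)
--
--     return (valid, invalid)
-- ===== Notes on version B (the rewrite author's own statement) =====
-- stated objective: alternative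
-- what changed: Replaces the per-print scan over all rules with two repeated list.index calls per rule by a precomputed dict (rule head -> required-after pages) and a single left-to-right pass per print maintaining a seen set.
-- outside the precondition, e.g. on find_valid_prints([[2]], [[1]]): A returns ([[2]], []), B raises IndexError
import Mathlib
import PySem

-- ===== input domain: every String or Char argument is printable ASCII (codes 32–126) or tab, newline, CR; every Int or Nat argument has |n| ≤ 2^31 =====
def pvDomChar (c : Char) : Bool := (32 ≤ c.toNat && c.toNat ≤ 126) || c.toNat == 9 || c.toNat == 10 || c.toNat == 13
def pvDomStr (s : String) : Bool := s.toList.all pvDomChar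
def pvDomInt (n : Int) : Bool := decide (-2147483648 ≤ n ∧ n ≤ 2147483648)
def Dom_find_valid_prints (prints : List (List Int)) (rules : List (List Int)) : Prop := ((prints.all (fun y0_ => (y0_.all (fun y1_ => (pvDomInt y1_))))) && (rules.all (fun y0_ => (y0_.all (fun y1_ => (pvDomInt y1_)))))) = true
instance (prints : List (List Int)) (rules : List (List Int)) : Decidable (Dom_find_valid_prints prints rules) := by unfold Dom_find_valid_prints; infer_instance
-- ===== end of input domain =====

-- B replaces A's per-print scan over all rules (two .index calls each) by a dict
-- rule-head -> required-after pages built once, plus one left-to-right pass per print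
-- with a seen set (objective: alternative; same measured cost).

-- ===== PORT A =====
-- check_print: for each rule, try each.index(rule[0]) / each.index(rule[1]); ValueError (index? = none)
-- means the rule is skipped. rule[0]/rule[1] via pyGetD (in range under Pre_, where no IndexError occurs).
def checkPrint (each : List Int) : List (List Int) → Bool
  | [] => true
  | rule :: rest =>
    match PySem.List.index? each (PySem.List.pyGetD rule 0 0) with
    | none => checkPrint each rest
    | some left =>
      match PySem.List.index? each (PySem.List.pyGetD rule 1 0) with
      | none => checkPrint each rest
      | some right => if right < left then false else checkPrint each rest

def find_valid_prints (prints : List (List Int)) (rules : List (List Int)) : List (List Int) × List (List Int) :=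
  prints.foldl
    (fun acc each =>
      if checkPrint each rules then (acc.1 ++ [each], acc.2) else (acc.1, acc.2 ++ [each]))
    ([], [])

-- ===== PORT B =====
-- after.setdefault(rule[0], []).append(rule[1]) over all rules
def buildAfter (rules : List (List Int)) : PySem.Dict Int (List Int) :=
  (rules.map (fun rule => (PySem.List.pyGetD rule 0 0, PySem.List.pyGetD rule 1 0))).foldl
    (fun d p => d.modify p.1 [] (· ++ [p.2])) PySem.Dict.empty

-- single left-to-right pass with a seen set
def checkSeen (d : PySem.Dict Int (List Int)) : List Int → PySem.Set Int → Bool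
  | [], _ => true
  | v :: vs, seen =>
    if PySem.Set.contains seen v then checkSeen d vs seen
    else if (d.getD v []).any (fun w => PySem.Set.contains seen w) then false
    else checkSeen d vs (PySem.Set.add seen v)

def find_valid_prints_alt (prints : List (List Int)) (rules : List (List Int)) : List (List Int) × List (List Int) :=
  let after := buildAfter rules
  prints.foldl
    (fun acc each =>
      if checkSeen after each PySem.Set.empty then (acc.1 ++ [each], acc.2) else (acc.1, acc.2 ++ [each]))
    ([], [])

-- ===== PRECONDITION & SPEC =====
-- Pre_ excludes rule lists containing a rule shorter than 2 pages: Python A raises IndexError on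
-- every empty rule and on a 1-element rule whose head occurs in some print (and B's dict-building
-- loop raises IndexError on any short rule); on a 1-element rule whose head occurs in no print A
-- still returns — those inputs are excluded too, B raises there.
def Pre_find_valid_prints (prints : List (List Int)) (rules : List (List Int)) : Prop :=
  ∀ rule ∈ rules, 2 ≤ rule.length
instance (prints : List (List Int)) (rules : List (List Int)) : Decidable (Pre_find_valid_prints prints rules) := by unfold Pre_find_valid_prints; infer_instance

def pvWitness_find_valid_prints : List (List Int) × List (List Int) :=
  ([[1, 2, 3], [3, 1, 2], [2]], [[1, 2], [2, 3]])

def Spec_find_valid_prints (prints : List (List Int)) (rules : List (List Int)) (out : List (List Int) × List (List Int)) : Prop := out = find_valid_prints_alt prints rules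
instance (prints : List (List Int)) (rules : List (List Int)) (out : List (List Int) × List (List Int)) : Decidable (Spec_find_valid_prints prints rules out) := by unfold Spec_find_valid_prints; infer_instance

-- ===== CLAIM (what is proved, stated in full; the proofs are below) =====
def Claim_equal_find_valid_prints : Prop := ∀ (prints : List (List Int)) (rules : List (List Int)), Dom_find_valid_prints prints rules → Pre_find_valid_prints prints rules → Spec_find_valid_prints prints rules (find_valid_prints prints rules)

-- ===== LEMMAS AND PROOFS =====

-- "b occurs strictly before (the first occurrence of) a in s"
def Precedes (s : List Int) (b a : Int) : Prop :=
  ∃ k l, PySem.List.index? s b = some k ∧ PySem.List.index? s a = some l ∧ k < l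

lemma not_precedes_of_left_none {s : List Int} {b a : Int}
    (h : PySem.List.index? s b = none) : ¬ Precedes s b a := by
  rintro ⟨k, l, hk, hl, hlt⟩; rw [h] at hk; cases hk

lemma not_precedes_of_right_none {s : List Int} {b a : Int}
    (h : PySem.List.index? s a = none) : ¬ Precedes s b a := by
  rintro ⟨k, l, hk, hl, hlt⟩; rw [h] at hl; cases hl

lemma precedes_iff_of_some {s : List Int} {b a : Int} {k l : Nat}
    (hk : PySem.List.index? s b = some k) (hl : PySem.List.index? s a = some l) :
    Precedes s b a ↔ k < l := by
  constructor
  · rintro ⟨k', l', hk', hl', hlt⟩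
    rw [hk] at hk'; rw [hl] at hl'
    cases hk'; cases hl'; exact hlt
  · intro hlt; exact ⟨k, l, hk, hl, hlt⟩

lemma precedes_cons {v b a : Int} {vs : List Int} (hb : b ≠ v) (ha : a ≠ v) :
    Precedes (v :: vs) b a ↔ Precedes vs b a := by
  unfold Precedes
  rw [PySem.List.index?_cons_of_ne _ (Ne.symm hb), PySem.List.index?_cons_of_ne _ (Ne.symm ha)]
  constructor
  · rintro ⟨k, l, hk, hl, hlt⟩
    rcases Option.map_eq_some_iff.mp hk with ⟨k', hk', rfl⟩
    rcases Option.map_eq_some_iff.mp hl with ⟨l', hl', rfl⟩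
    exact ⟨k', l', hk', hl', by omega⟩
  · rintro ⟨k, l, hk, hl, hlt⟩
    exact ⟨k + 1, l + 1, Option.map_eq_some_iff.mpr ⟨k, hk, rfl⟩,
      Option.map_eq_some_iff.mpr ⟨l, hl, rfl⟩, by omega⟩

lemma not_precedes_cons_self_right {v b : Int} {vs : List Int} :
    ¬ Precedes (v :: vs) b v := by
  rintro ⟨k, l, hk, hl, hlt⟩
  rw [PySem.List.index?_cons_self] at hl
  cases hl; omega

lemma precedes_cons_self_left {v a : Int} {vs : List Int} (ha : a ≠ v) (hmem : a ∈ vs) :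
    Precedes (v :: vs) v a := by
  have hsome : (PySem.List.index? vs a).isSome := (PySem.List.index?_isSome_iff vs a).mpr hmem
  rcases Option.isSome_iff_exists.mp hsome with ⟨l, hl⟩
  refine ⟨0, l + 1, PySem.List.index?_cons_self v vs, ?_, by omega⟩
  rw [PySem.List.index?_cons_of_ne _ (Ne.symm ha), hl]; rfl

lemma checkPrint_iff (each : List Int) (rules : List (List Int)) :
    checkPrint each rules = true ↔
      ∀ rule ∈ rules, ¬ Precedes each (PySem.List.pyGetD rule 1 0) (PySem.List.pyGetD rule 0 0) := by
  induction rules with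
  | nil => simp [checkPrint]
  | cons rule rest ih =>
    simp only [checkPrint, List.mem_cons, forall_eq_or_imp]
    rcases h0 : PySem.List.index? each (PySem.List.pyGetD rule 0 0) with _ | left
    all_goals dsimp only
    · have := not_precedes_of_right_none (b := PySem.List.pyGetD rule 1 0) h0
      rw [ih]; tauto
    · rcases h1 : PySem.List.index? each (PySem.List.pyGetD rule 1 0) with _ | right
      all_goals dsimp only
      · have := not_precedes_of_left_none (a := PySem.List.pyGetD rule 0 0) h1
        rw [ih]; tauto
      · have hp := precedes_iff_of_some h1 h0
        split_ifs with hlt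
        · simp only [false_iff]
          intro h; exact absurd (hp.mpr hlt) h.1
        · rw [ih]
          have : ¬ Precedes each (PySem.List.pyGetD rule 1 0) (PySem.List.pyGetD rule 0 0) := by
            rw [hp]; omega
          tauto

lemma getD_buildAfter (rules : List (List Int)) (v b : Int) :
    b ∈ (buildAfter rules).getD v [] ↔
      ∃ rule ∈ rules, PySem.List.pyGetD rule 0 0 = v ∧ PySem.List.pyGetD rule 1 0 = b := by
  unfold buildAfter
  rw [PySem.Dict.getD_foldl_modify_append]
  simp [List.mem_filter, List.mem_map]

lemma mem_ofList_contains {p : List Int} {x : Int} :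
    PySem.Set.contains (PySem.Set.ofList p) x = true ↔ x ∈ p := by
  rw [PySem.Set.contains_iff, PySem.Set.mem_ofList]

lemma checkSeen_inv (d : PySem.Dict Int (List Int)) :
    ∀ (s p : List Int), checkSeen d s (PySem.Set.ofList p) = true ↔
      ∀ a ∈ s, a ∉ p → ∀ b ∈ d.getD a [], b ∉ p ∧ ¬ Precedes s b a := by
  intro s
  induction s with
  | nil => intro p; simp [checkSeen]
  | cons v vs ih =>
    intro p
    simp only [checkSeen]
    by_cases hv : v ∈ p
    · rw [if_pos (mem_ofList_contains.mpr hv), ih]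
      constructor
      · intro h a ha hap b hb
        have hav : a ≠ v := fun he => hap (he ▸ hv)
        have ha' : a ∈ vs := by rcases List.mem_cons.mp ha with he | h'; exact absurd he hav; exact h'
        obtain ⟨hbp, hnp⟩ := h a ha' hap b hb
        have hbv : b ≠ v := fun he => hbp (he ▸ hv)
        exact ⟨hbp, fun hpre => hnp ((precedes_cons hbv hav).mp hpre)⟩
      · intro h a ha hap b hb
        have hav : a ≠ v := fun he => hap (he ▸ hv)
        obtain ⟨hbp, hnp⟩ := h a (List.mem_cons_of_mem v ha) hap b hb
        have hbv : b ≠ v := fun he => hbp (he ▸ hv)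
        exact ⟨hbp, fun hpre => hnp ((precedes_cons hbv hav).mpr hpre)⟩
    · rw [if_neg (by simp [hv])]
      by_cases hany : (d.getD v []).any (fun w => PySem.Set.contains (PySem.Set.ofList p) w) = true
      · rw [if_pos hany]
        refine iff_of_false (by simp) (fun h => ?_)
        rcases List.any_eq_true.mp hany with ⟨w, hw, hwp⟩
        exact (h v (List.mem_cons_self) hv w hw).1 (mem_ofList_contains.mp hwp)
      · rw [if_neg hany, ← PySem.Set.ofList_append_singleton, ih]
        have hnone : ∀ w ∈ d.getD v [], w ∉ p := by
          intro w hw hwp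
          exact hany (List.any_eq_true.mpr ⟨w, hw, mem_ofList_contains.mpr hwp⟩)
        constructor
        · intro h a ha hap b hb
          by_cases hav : a = v
          · subst hav
            exact ⟨hnone b hb, not_precedes_cons_self_right⟩
          · have ha' : a ∈ vs := (List.mem_cons.mp ha).resolve_left hav
            obtain ⟨hbp, hnp⟩ := h a ha'
              (fun hm => (List.mem_append.mp hm).elim hap (fun h' => hav (by simpa using h'))) b hb
            have hbp' : b ∉ p := fun he => hbp (List.mem_append.mpr (Or.inl he))
            have hbv : b ≠ v := fun he => hbp (List.mem_append.mpr (Or.inr (by simp [he])))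
            exact ⟨hbp', fun hpre => hnp ((precedes_cons hbv hav).mp hpre)⟩
        · intro h a ha hap b hb
          have hap' : a ∉ p := fun he => hap (List.mem_append.mpr (Or.inl he))
          have hav : a ≠ v := fun he => hap (List.mem_append.mpr (Or.inr (by simp [he])))
          obtain ⟨hbp, hnp⟩ := h a (List.mem_cons_of_mem v ha) hap' b hb
          have hbv : b ≠ v := fun he => hnp (by rw [he]; exact precedes_cons_self_left hav ha)
          refine ⟨fun hbm => ?_, fun hpre => hnp ((precedes_cons hbv hav).mpr hpre)⟩
          rcases List.mem_append.mp hbm with h' | h'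
          · exact hbp h'
          · exact hbv (by simpa using h')

lemma check_eq (rules : List (List Int)) (each : List Int) :
    checkPrint each rules = checkSeen (buildAfter rules) each PySem.Set.empty := by
  have h : (PySem.Set.empty : PySem.Set Int) = PySem.Set.ofList [] := rfl
  rw [Bool.eq_iff_iff, checkPrint_iff, h, checkSeen_inv]
  constructor
  · intro hA a ha _ b hb
    rcases (getD_buildAfter rules a b).mp hb with ⟨rule, hr, hk, hv⟩
    exact ⟨List.not_mem_nil, by rw [← hk, ← hv]; exact hA rule hr⟩
  · intro hB rule hr
    by_cases hm : PySem.List.pyGetD rule 0 0 ∈ each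
    · exact (hB _ hm List.not_mem_nil _ ((getD_buildAfter rules _ _).mpr ⟨rule, hr, rfl, rfl⟩)).2
    · exact not_precedes_of_right_none ((PySem.List.index?_eq_none_iff _ _).mpr hm)

-- ===== VERDICT (by name: the statement is the Claim_ definition above) =====
theorem find_valid_prints_spec : Claim_equal_find_valid_prints := by
  intro prints rules _ _
  unfold Spec_find_valid_prints find_valid_prints find_valid_prints_alt
  simp only [check_eq]
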